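-- pv_equiv track=rewrite | github.com/LIANGKE23/Knowledge_Assisted_Medical_Dialogue_Generation_Mechanism | data-prepare/haodf/distance.py | _get_one_hot
-- ===== SOURCE A (Python) =====
-- def _get_one_hot(faq):
--     # 构建词袋
--     word_bag = []
--     for q in faq:
--         for w in q:
--             if w not in word_bag:
--                 word_bag.append(w)
--     # one hot 向量
--     faq2vec = []
--     for kd in faq:
--         v = [0]*len(word_bag)
--         for w in kd:
--             if w in word_bag:
--                 v[word_bag.index(w)] = 1
--         faq2vec.append(v)
--     # 倒排索引
--     word2faqidx = {}
--     for i, q in enumerate(faq):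
--         for w in q:
--             if w in word2faqidx:
--                 word2faqidx[w].append(i)
--             else:
--                 word2faqidx[w] = [i]
--     return word_bag, faq2vec, word2faqidx
-- ===== SOURCE B (Python) =====
-- def _get_one_hot(faq):
--     # One pass builds the inverted index; the word bag is its key order;
--     # each one-hot row is a membership map over the bag (no list.index scans).
--     word2faqidx = {}
--     for i, q in enumerate(faq):
--         for w in q:
--             word2faqidx.setdefault(w, []).append(i)
--     word_bag = list(word2faqidx)
--     faq2vec = [[1 if w in qs else 0 for w in word_bag]
--                for qs in (set(q) for q in faq)]
--     return word_bag, faq2vec, word2faqidx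
-- ===== Notes on version B (the rewrite author's own statement) =====
-- stated objective: faster
-- what changed: B builds the inverted index in a single pass over the corpus, derives the word bag from the dict's key order, and forms each one-hot row as a membership map over the bag using a per-question set, removing A's separate bag-building pass with 'w not in word_bag' list scans and the quadratic word_bag.index calls.
import Mathlib
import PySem

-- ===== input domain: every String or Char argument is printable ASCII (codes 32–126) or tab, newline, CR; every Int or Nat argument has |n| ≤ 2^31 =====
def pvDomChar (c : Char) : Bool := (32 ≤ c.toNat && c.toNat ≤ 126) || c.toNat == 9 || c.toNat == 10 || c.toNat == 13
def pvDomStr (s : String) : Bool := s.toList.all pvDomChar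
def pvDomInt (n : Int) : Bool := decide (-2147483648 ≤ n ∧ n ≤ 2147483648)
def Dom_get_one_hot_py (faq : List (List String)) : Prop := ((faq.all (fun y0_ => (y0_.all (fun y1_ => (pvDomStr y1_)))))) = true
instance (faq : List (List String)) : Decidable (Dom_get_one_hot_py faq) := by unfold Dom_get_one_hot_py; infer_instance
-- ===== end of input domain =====

-- B: one pass builds the inverted index, the word bag is its key order, and each one-hot
-- row is a membership map over the bag — no rescanning passes, no list.index (faster).

-- ===== PORT A =====
def get_one_hot_py (faq : List (List String)) : List String × List (List Int) × (List (String × List Int)) :=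
  -- word_bag: append each unseen word
  let word_bag : List String := faq.foldl (fun bag q =>
    q.foldl (fun bag w => if bag.contains w then bag else bag ++ [w]) bag) []
  -- faq2vec: zero row, set 1 at word_bag.index(w)
  let faq2vec : List (List Int) := faq.foldl (fun acc kd =>
    acc ++ [kd.foldl (fun v w =>
      if word_bag.contains w then
        match PySem.List.index? word_bag w with
        | some j => v.set j 1
        | none => v          -- unreachable: guarded by the contains test
      else v) (List.replicate word_bag.length (0 : Int))]) []
  -- inverted index
  let d : PySem.Dict String (List Int) := (PySem.List.enumerate faq).foldl (fun d p =>
    p.2.foldl (fun d w =>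
      if d.contains w then d.modify w [] (fun l => l ++ [p.1])
      else d.insert w [p.1]) d) PySem.Dict.empty
  (word_bag, faq2vec, d.items)

-- ===== PORT B =====
def get_one_hot_py_alt (faq : List (List String)) : List String × List (List Int) × (List (String × List Int)) :=
  let d : PySem.Dict String (List Int) := (PySem.List.enumerate faq).foldl (fun d p =>
    p.2.foldl (fun d w => d.modify w [] (fun l => l ++ [p.1])) d) PySem.Dict.empty
  let word_bag : List String := d.keys
  let faq2vec : List (List Int) := faq.map (fun q =>
    let qs := PySem.Set.ofList q
    word_bag.map (fun w => if qs.contains w then (1 : Int) else 0))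
  (word_bag, faq2vec, d.items)

-- ===== PRECONDITION & SPEC =====
def Spec_get_one_hot_py (faq : List (List String)) (out : List String × List (List Int) × (List (String × List Int))) : Prop := out = get_one_hot_py_alt faq
instance (faq : List (List String)) (out : List String × List (List Int) × (List (String × List Int))) : Decidable (Spec_get_one_hot_py faq out) := by unfold Spec_get_one_hot_py; infer_instance

-- ===== CLAIM (what is proved, stated in full; the proofs are below) =====
def Claim_equal_get_one_hot_py : Prop := ∀ (faq : List (List String)), Dom_get_one_hot_py faq → Spec_get_one_hot_py faq (get_one_hot_py faq)

-- ===== LEMMAS AND PROOFS =====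

-- The two dict-building loop bodies agree: when the key is absent, 'modify w [] (·++[i])' IS 'insert w [i]'.
lemma dict_step_eq (d : PySem.Dict String (List Int)) (w : String) (i : Int) :
    (if d.contains w then d.modify w [] (fun l => l ++ [i]) else d.insert w [i])
      = d.modify w [] (fun l => l ++ [i]) := by
  by_cases h : d.contains w
  · simp [h]
  · simp only [Bool.not_eq_true] at h
    simp [h, PySem.Dict.modify, PySem.Dict.getD_of_not_contains d [] h]

lemma dicts_eq (faq : List (List String)) :
    ((PySem.List.enumerate faq).foldl (fun d p =>
      p.2.foldl (fun d w =>
        if d.contains w then d.modify w [] (fun l => l ++ [p.1])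
        else d.insert w [p.1]) d) PySem.Dict.empty)
    = ((PySem.List.enumerate faq).foldl (fun d p =>
      p.2.foldl (fun d w => d.modify w [] (fun l => l ++ [p.1])) d) PySem.Dict.empty) := by
  have : (fun (d : PySem.Dict String (List Int)) (p : Int × List String) =>
      p.2.foldl (fun d w =>
        if d.contains w then d.modify w [] (fun l => l ++ [p.1])
        else d.insert w [p.1]) d)
    = (fun (d : PySem.Dict String (List Int)) (p : Int × List String) =>
      p.2.foldl (fun d w => d.modify w [] (fun l => l ++ [p.1])) d) := by
    funext d p
    congr 1
    funext d' w
    exact dict_step_eq d' w p.1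
  rw [this]

-- A's bag-building loop over one question is Set.update.
lemma bag_inner_eq (bag : List String) (q : List String) :
    q.foldl (fun bag w => if bag.contains w then bag else bag ++ [w]) bag
      = PySem.Set.update bag q := rfl

-- A's word bag equals the keys of B's dict fold.
lemma bag_eq_keys (faq : List (List String)) : ∀ (s : Int) (bag : List String)
    (d : PySem.Dict String (List Int)), bag = d.keys →
    faq.foldl (fun bag q =>
      q.foldl (fun bag w => if bag.contains w then bag else bag ++ [w]) bag) bag
    = ((PySem.List.enumerate faq s).foldl (fun d p =>
        p.2.foldl (fun d w => d.modify w [] (fun l => l ++ [p.1])) d) d).keys := by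
  induction faq with
  | nil => intro s bag d h; simpa [PySem.List.enumerate] using h
  | cons q rest ih =>
    intro s bag d h
    rw [PySem.List.enumerate_cons, List.foldl_cons, List.foldl_cons]
    exact ih (s + 1) _ _ (by
      rw [bag_inner_eq, PySem.Dict.keys_foldl_modify q [] (fun _ _ l => l ++ [s]) d, h])

lemma bag_nodup (faq : List (List String)) : ∀ (bag : List String), bag.Nodup →
    (faq.foldl (fun bag q =>
      q.foldl (fun bag w => if bag.contains w then bag else bag ++ [w]) bag) bag).Nodup := by
  induction faq with
  | nil => intro bag h; simpa using h
  | cons q rest ih =>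
    intro bag h
    rw [List.foldl_cons]
    exact ih _ (by rw [bag_inner_eq]; exact PySem.Set.nodup_update bag q h)

lemma bag_mem (faq : List (List String)) : ∀ (bag : List String) (w : String),
    (w ∈ bag ∨ ∃ q ∈ faq, w ∈ q) →
    w ∈ faq.foldl (fun bag q =>
      q.foldl (fun bag w => if bag.contains w then bag else bag ++ [w]) bag) bag := by
  induction faq with
  | nil =>
    intro bag w h
    simpa using h.resolve_right (by rintro ⟨q, hq, _⟩; simp at hq)
  | cons q rest ih =>
    intro bag w h
    rw [List.foldl_cons]
    apply ih
    rcases h with h | ⟨q', hq', hw⟩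
    · exact Or.inl (by rw [bag_inner_eq]; exact (PySem.Set.mem_update bag q w).mpr (Or.inl h))
    · rcases List.mem_cons.mp hq' with rfl | hq'
      · exact Or.inl (by rw [bag_inner_eq]; exact (PySem.Set.mem_update bag q' w).mpr (Or.inr hw))
      · exact Or.inr ⟨q', hq', hw⟩

-- The row fold keeps the row length.
lemma row_fold_length (bag : List String) (kd : List String) : ∀ (v : List Int),
    (kd.foldl (fun v w =>
      if bag.contains w then
        match PySem.List.index? bag w with
        | some j => v.set j 1
        | none => v
      else v) v).length = v.length := by
  induction kd with
  | nil => intro v; rfl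
  | cons w kd' ih =>
    intro v
    rw [List.foldl_cons, ih]
    by_cases h : bag.contains w
    · rw [if_pos h]
      cases PySem.List.index? bag w <;> simp
    · rw [if_neg h]

-- Entry-wise description of A's row fold.
lemma row_fold_getElem? (bag : List String) (hnd : bag.Nodup) (kd : List String)
    (hkd : ∀ w ∈ kd, w ∈ bag) : ∀ (v : List Int), v.length = bag.length →
    ∀ (j : Nat) (hj : j < bag.length),
    (kd.foldl (fun v w =>
      if bag.contains w then
        match PySem.List.index? bag w with
        | some j => v.set j 1
        | none => v
      else v) v)[j]? = some (if bag[j]'hj ∈ kd then 1 else v.getD j 0) := by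
  induction kd with
  | nil =>
    intro v hlen j hj
    rw [List.foldl_nil]
    simp [List.getD_eq_getElem?_getD, List.getElem?_eq_getElem (show j < v.length by omega)]
  | cons w kd' ih =>
    intro v hlen j hj
    have hwb : w ∈ bag := hkd w (List.mem_cons_self)
    have hc : bag.contains w = true := by simpa using hwb
    obtain ⟨k, hk⟩ : ∃ k, PySem.List.index? bag w = some k :=
      Option.isSome_iff_exists.mp ((PySem.List.index?_isSome_iff bag w).mpr hwb)
    obtain ⟨hklt, hbk, _⟩ := PySem.List.getElem_of_index?_eq_some hk
    rw [List.foldl_cons]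
    simp only [hc, if_true, hk]
    rw [ih (fun w' hw' => hkd w' (List.mem_cons_of_mem _ hw')) (v.set k 1)
      (by simpa using hlen) j hj]
    congr 1
    have hiff : bag[j]'hj = w ↔ j = k := by
      constructor
      · intro he; exact hnd.getElem_inj_iff.mp (by rw [he, hbk])
      · intro he; subst he; exact hbk
    by_cases hmem : bag[j]'hj ∈ kd'
    · simp [hmem]
    · by_cases hjk : j = k
      · subst hjk
        simp [hiff.mpr rfl, List.getD_eq_getElem?_getD,
          List.getElem?_set_self' , List.getElem?_eq_getElem (show j < v.length by omega)]
      · have hne : ¬ bag[j]'hj = w := fun h => hjk (hiff.mp h)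
        simp [hmem, hne, List.getD_eq_getElem?_getD, List.getElem?_set_ne (fun h => hjk h.symm)]

-- A's row equals B's membership row, for every question whose words are all in the bag.
lemma row_eq (bag : List String) (hnd : bag.Nodup) (kd : List String)
    (hkd : ∀ w ∈ kd, w ∈ bag) :
    kd.foldl (fun v w =>
      if bag.contains w then
        match PySem.List.index? bag w with
        | some j => v.set j 1
        | none => v
      else v) (List.replicate bag.length (0 : Int))
    = bag.map (fun w => if (PySem.Set.ofList kd).contains w then (1 : Int) else 0) := by
  apply List.ext_getElem?
  intro j
  by_cases hj : j < bag.length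
  · rw [row_fold_getElem? bag hnd kd hkd (List.replicate bag.length 0) (by simp) j hj]
    rw [List.getElem?_map, List.getElem?_eq_getElem hj]
    by_cases hm : bag[j]'hj ∈ kd
    · simp [hm]
    · simp [hm]
  · rw [List.getElem?_eq_none (by rw [row_fold_length]; simpa using hj),
      List.getElem?_eq_none (by simpa using hj)]

-- ===== VERDICT (by name: the statement is the Claim_ definition above) =====
theorem get_one_hot_py_spec : Claim_equal_get_one_hot_py := by
  intro faq _
  unfold Spec_get_one_hot_py
  simp only [get_one_hot_py, get_one_hot_py_alt, Prod.mk.injEq]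
  have hbag := bag_eq_keys faq 0 [] PySem.Dict.empty (by rfl)
  have hnd : (faq.foldl (fun bag q =>
      q.foldl (fun bag w => if bag.contains w then bag else bag ++ [w]) bag) []).Nodup :=
    bag_nodup faq [] (by simp)
  have hmem : ∀ q ∈ faq, ∀ w ∈ q, w ∈ faq.foldl (fun bag q =>
      q.foldl (fun bag w => if bag.contains w then bag else bag ++ [w]) bag) [] :=
    fun q hq w hw => bag_mem faq [] w (Or.inr ⟨q, hq, hw⟩)
  refine ⟨hbag, ?_, by rw [dicts_eq faq]⟩
  simp only [PySem.List.foldl_append_singleton_eq_map, List.nil_append]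
  apply List.map_congr_left
  intro q hq
  rw [row_eq _ hnd q (hmem q hq), hbag]
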